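-- pv_equiv track=rewrite | github.com/Klara-Haggblom/lab2_template | lab-1-information-extraction-klaraannie-team/tramdata.py | build_tram_lines
-- ===== SOURCE A (Python) =====
-- def build_tram_lines(lines):
--     tram_lines = {}
--     tram_number = None
--     for line in lines:
--         line = line.strip()
--
--         if line and line[0].isdigit():
--             tram_number = int(line.split(":")[0])
--             tram_lines[tram_number] = []
--
--         elif tram_number is not None:
--             names_and_times = line.split()
--             if line and line[0].isalpha():
--                 names = " ".join(names_and_times[:-1])
--                 tram_lines[tram_number].append(names)
--     return tram_lines
-- ===== SOURCE B (Python) =====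
-- def _is_header(s):
--     return bool(s) and s[0].isdigit()
--
--
-- def _is_stop(s):
--     return bool(s) and s[0].isalpha()
--
--
-- def _stop_name(s):
--     return " ".join(s.split()[:-1])
--
--
-- def build_tram_lines(lines):
--     # Group-splitting decomposition: strip once, skip the preamble before the
--     # first header, then repeatedly peel off one header and its block of
--     # following non-header lines, turning the block into its list of stop names.
--     stripped = [l.strip() for l in lines]
--     i = 0
--     while i < len(stripped) and not _is_header(stripped[i]):
--         i += 1
--     rest = stripped[i:]
--     result = {}
--     while rest:
--         header, rest = rest[0], rest[1:]
--         j = 0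
--         while j < len(rest) and not _is_header(rest[j]):
--             j += 1
--         group, rest = rest[:j], rest[j:]
--         result[int(header.split(":")[0])] = [_stop_name(s) for s in group if _is_stop(s)]
--     return result
-- ===== Notes on version B (the rewrite author's own statement) =====
-- stated objective: alternative
-- what changed: A's single stateful fold carrying the current tram number and mutating the dict line by line is replaced by a group-splitting two-phase scan: strip once, drop the preamble before the first header, then repeatedly peel off one header and its whole block of following non-header lines, turning each block into its stop list with a comprehension.
import Mathlib
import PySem

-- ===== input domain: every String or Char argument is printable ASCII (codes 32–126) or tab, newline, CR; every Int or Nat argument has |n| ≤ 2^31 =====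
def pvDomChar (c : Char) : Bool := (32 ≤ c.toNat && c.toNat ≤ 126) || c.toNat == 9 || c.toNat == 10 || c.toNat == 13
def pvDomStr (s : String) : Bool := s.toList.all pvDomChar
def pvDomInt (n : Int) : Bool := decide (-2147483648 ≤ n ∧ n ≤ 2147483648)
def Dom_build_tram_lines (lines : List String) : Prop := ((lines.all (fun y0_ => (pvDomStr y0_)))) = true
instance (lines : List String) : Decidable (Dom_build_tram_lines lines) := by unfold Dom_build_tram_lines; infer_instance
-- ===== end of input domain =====

-- B replaces A's single stateful fold (current-tram-number + per-line dict mutation) by a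
-- group-splitting two-phase scan (drop preamble, then peel header+block repeatedly); objective: alternative.


-- shared helpers: int(line.split(":")[0]) of a stripped line (.getD 0 never reached inside Pre_),
-- and " ".join(line.split()[:-1])
def pvHeaderNum (s : List Char) : Int :=
  (PySem.Int.ofChars? ((PySem.Chars.splitOn s [':']).headD [])).getD 0

def pvStopName (s : List Char) : String :=
  String.ofList (PySem.Chars.join [' '] ((PySem.Chars.split₀ s).dropLast))

-- ===== PORT A =====
def build_tram_lines (lines : List String) : List (Int × List String) :=
  (lines.foldl
    (fun st line =>
      let s := (PySem.Str.strip line).toList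
      if !s.isEmpty && PySem.Chars.isdigit (s.headD ' ') then
        let n := pvHeaderNum s
        (st.1.insert n [], some n)
      else
        match st.2 with
        | none => st
        | some n =>
          if !s.isEmpty && PySem.Chars.isalpha (s.headD ' ') then
            (st.1.modify n [] (· ++ [pvStopName s]), some n)
          else st)
    ((PySem.Dict.empty : PySem.Dict Int (List String)), (none : Option Int))).1.items

-- ===== PORT B =====
-- _is_header and _is_stop of Source B
def pvIsHeader (s : List Char) : Bool := !s.isEmpty && PySem.Chars.isdigit (s.headD ' ')
def pvIsStop (s : List Char) : Bool := !s.isEmpty && PySem.Chars.isalpha (s.headD ' ')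

def pvGroups : List (List Char) → PySem.Dict Int (List String) → PySem.Dict Int (List String)
  | [], acc => acc
  | h :: rest, acc =>
    let group := rest.takeWhile (fun s => !pvIsHeader s)
    let rest' := rest.dropWhile (fun s => !pvIsHeader s)
    pvGroups rest' (acc.insert (pvHeaderNum h) ((group.filter pvIsStop).map pvStopName))
  termination_by l => l.length
  decreasing_by
    simp only [List.length_cons]
    exact Nat.lt_succ_of_le (List.length_dropWhile_le _ _)

def build_tram_lines_alt (lines : List String) : List (Int × List String) :=
  let stripped := lines.map (fun l => (PySem.Str.strip l).toList)
  (pvGroups (stripped.dropWhile (fun s => !pvIsHeader s)) PySem.Dict.empty).items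

-- ===== PRECONDITION & SPEC =====
-- Pre_ excludes exactly the inputs on which A raises ValueError: a stripped line starting
-- with a digit whose text before the first ':' is not a valid Python int literal.
def Pre_build_tram_lines (lines : List String) : Prop :=
  ∀ l ∈ lines,
    (let s := (PySem.Str.strip l).toList
     (!s.isEmpty && PySem.Chars.isdigit (s.headD ' ')) = true →
       (PySem.Int.ofChars? ((PySem.Chars.splitOn s [':']).headD [])).isSome = true)
instance (lines : List String) : Decidable (Pre_build_tram_lines lines) := by
  unfold Pre_build_tram_lines; infer_instance

def pvWitness_build_tram_lines : List String := ["1: Central", "Alpha 5", "", "Beta 7"]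

def Spec_build_tram_lines (lines : List String) (out : List (Int × List String)) : Prop := out = build_tram_lines_alt lines
instance (lines : List String) (out : List (Int × List String)) : Decidable (Spec_build_tram_lines lines out) := by unfold Spec_build_tram_lines; infer_instance

-- ===== CLAIM (what is proved, stated in full; the proofs are below) =====
def Claim_equal_build_tram_lines : Prop := ∀ (lines : List String), Dom_build_tram_lines lines → Pre_build_tram_lines lines → Spec_build_tram_lines lines (build_tram_lines lines)

-- ===== LEMMAS AND PROOFS =====

-- A's loop body, over the already-stripped character list
def pvStepCS (st : PySem.Dict Int (List String) × Option Int) (s : List Char) :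
    PySem.Dict Int (List String) × Option Int :=
  if pvIsHeader s then
    let n := pvHeaderNum s
    (st.1.insert n [], some n)
  else
    match st.2 with
    | none => st
    | some n =>
      if pvIsStop s then
        (st.1.modify n [] (· ++ [pvStopName s]), some n)
      else st

lemma pv_buildA_eq_foldCS (lines : List String) :
    build_tram_lines lines =
      ((lines.map (fun l => (PySem.Str.strip l).toList)).foldl pvStepCS
        (PySem.Dict.empty, none)).1.items := by
  rw [List.foldl_map]; rfl

lemma pv_stepCS_header {st} {s : List Char} (h : pvIsHeader s = true) :
    pvStepCS st s = (st.1.insert (pvHeaderNum s) [], some (pvHeaderNum s)) := by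
  simp [pvStepCS, h]

lemma pv_stepCS_stop {st : PySem.Dict Int (List String) × Option Int} {n : Int} {s : List Char}
    (h2 : st.2 = some n) (h : pvIsHeader s = false) (hs : pvIsStop s = true) :
    pvStepCS st s = (st.1.modify n [] (· ++ [pvStopName s]), some n) := by
  simp [pvStepCS, h, h2, hs]

lemma pv_stepCS_skip {st : PySem.Dict Int (List String) × Option Int} {s : List Char}
    (h : pvIsHeader s = false) (hs : pvIsStop s = false) :
    pvStepCS st s = st := by
  cases hst : st.2 with
  | none => simp [pvStepCS, h, hst]
  | some n => simp [pvStepCS, h, hst, hs]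

lemma pv_modify_insert {d : PySem.Dict Int (List String)} (n : Int) (acc : List String)
    (f : List String → List String) : (d.insert n acc).modify n [] f = d.insert n (f acc) := by
  simp [PySem.Dict.modify, PySem.Dict.getD_insert_self, PySem.Dict.insert_insert_self]

lemma pv_fold_group (ss : List (List Char)) : ∀ (d : PySem.Dict Int (List String)) (n : Int)
    (acc : List String),
    (ss.foldl pvStepCS (d.insert n acc, some n)).1 =
      pvGroups (ss.dropWhile (fun s => !pvIsHeader s))
        (d.insert n (acc ++ ((ss.takeWhile (fun s => !pvIsHeader s)).filter pvIsStop).map pvStopName)) := by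
  induction ss with
  | nil => intro d n acc; simp [pvGroups]
  | cons s t ih =>
    intro d n acc
    rw [List.foldl_cons, List.dropWhile_cons, List.takeWhile_cons]
    by_cases hh : pvIsHeader s = true
    · rw [pv_stepCS_header hh]
      have := ih (d.insert n acc) (pvHeaderNum s) []
      simp only [List.nil_append] at this
      rw [this]
      simp only [hh, Bool.not_true, Bool.false_eq_true, if_false, List.filter_nil,
        List.map_nil, List.append_nil, pvGroups]
    · rw [Bool.not_eq_true] at hh
      simp only [hh, Bool.not_false, if_true]
      by_cases hs : pvIsStop s = true
      · rw [pv_stepCS_stop rfl hh hs, pv_modify_insert, ih d n (acc ++ [pvStopName s])]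
        simp only [List.filter_cons, hs, if_true, List.map_cons, List.append_assoc,
          List.singleton_append]
      · rw [Bool.not_eq_true] at hs
        rw [pv_stepCS_skip hh hs, ih d n acc]
        simp only [List.filter_cons, hs, Bool.false_eq_true, if_false]

lemma pv_fold_none (ss : List (List Char)) : ∀ (d : PySem.Dict Int (List String)),
    (ss.foldl pvStepCS (d, none)).1 =
      pvGroups (ss.dropWhile (fun s => !pvIsHeader s)) d := by
  induction ss with
  | nil => intro d; simp [pvGroups]
  | cons s t ih =>
    intro d
    rw [List.foldl_cons, List.dropWhile_cons]
    by_cases hh : pvIsHeader s = true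
    · rw [pv_stepCS_header hh]
      have := pv_fold_group t d (pvHeaderNum s) []
      simp only [List.nil_append] at this
      rw [this]
      simp only [hh, Bool.not_true, Bool.false_eq_true, if_false, pvGroups]
    · rw [Bool.not_eq_true] at hh
      have hskip : pvStepCS (d, (none : Option Int)) s = (d, none) := by
        simp [pvStepCS, hh]
      rw [hskip]
      simp only [hh, Bool.not_false, if_true]
      exact ih d

-- ===== VERDICT (by name: the statement is the Claim_ definition above) =====
theorem build_tram_lines_spec : Claim_equal_build_tram_lines := by
  intro lines _ _
  unfold Spec_build_tram_lines build_tram_lines_alt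
  rw [pv_buildA_eq_foldCS, pv_fold_none]
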